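-- pv_equiv track=rewrite | github.com/reyejona/GitPythonProject | task.py | conv_endian
-- ===== SOURCE A (Python) =====
-- def conv_endian(num, endian='big'):
--     """
--     Function that takes a decimal value and which endian direction it is and
--     returns the hex value in whatever endian type it is.
--     :param num: decimal value
--     :param endian: what direction the hex value goes
--     :return: hex value result or None if the endian value is not valid
--     """
--
--     sign = ''
--     if endian != 'big' and endian != "little":
--         # check to see if the endian value is valid
--         return None
--     elif num == 0:
--         # we do not need to convert to hex
--         # since it's always going to be 00
--         return '00'
--     elif num < 0:
--         sign = "-"
--         num = abs(num)
--
--     # init both empty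
--     hex_nums, result = "", []
--     hex_dict = {10: 'A', 11: 'B', 12: 'C', 13: 'D', 14: 'E', 15: 'F'}
--
--     while num != 0:
--         # each new item to add to the hex string is
--         # the remainder when you divide num by 16
--         rem = num % 16
--         new_val = hex_dict[rem] if rem in hex_dict.keys() else str(rem)
--         hex_nums += new_val
--         num = num // 16
--
--     # split the string in to 2 byte sections (order needs to be
--     # reversed since we generally read from the bottom when
--     # taking the remainder doing this by hand
--     [
--         result.append(hex_nums[i:i + 2][::-1])
--         for i in reversed(range(0, len(hex_nums), 2))
--     ]
--
--     if len(result[0]) < 2: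
--         result[0] = '0'+result[0]
--
--     result = " ".join(result) if endian == "big" else " ".join(result[::-1])
--     return sign + result
-- ===== SOURCE B (Python) =====
-- def conv_endian(num, endian='big'):
--     if endian not in ('big', 'little'):
--         return None
--     sign = '-' if num < 0 else ''
--     n = abs(num)
--     nbytes = max(1, (n.bit_length() + 7) // 8)
--     return sign + n.to_bytes(nbytes, endian).hex(' ').upper()
-- ===== Notes on version B (the rewrite author's own statement) =====
-- stated objective: idiomatic
-- what changed: A extracts hex digits one at a time with a manual %16//16 loop and a letter dict, then regroups them with reversed index slices and pads the first group afterwards; B instead computes the byte count from bit_length and renders abs(num) via int.to_bytes(count, endian).hex(' ').upper() with no digit loop, slicing or post-padding.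
import Mathlib
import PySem

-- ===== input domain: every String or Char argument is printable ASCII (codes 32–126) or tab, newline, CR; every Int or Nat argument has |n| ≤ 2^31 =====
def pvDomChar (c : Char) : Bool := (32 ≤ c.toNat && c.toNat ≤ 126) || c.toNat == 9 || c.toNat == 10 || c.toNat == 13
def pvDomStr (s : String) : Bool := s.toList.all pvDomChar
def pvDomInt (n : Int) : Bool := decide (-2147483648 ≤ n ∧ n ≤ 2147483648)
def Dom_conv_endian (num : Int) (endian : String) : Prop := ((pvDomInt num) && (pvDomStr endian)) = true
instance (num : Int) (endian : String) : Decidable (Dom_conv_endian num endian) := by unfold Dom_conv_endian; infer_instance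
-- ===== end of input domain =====

-- B replaces A's manual dict-driven per-hex-digit remainder loop and reversed-slice regrouping by the
-- idiomatic int.to_bytes(·, endian) + bytes.hex(' ') pipeline (per-byte base-256 digits); return value only.

-- ===== PORT A =====
def hexDictA : PySem.Dict Int (List Char) :=
  PySem.Dict.ofList [((10 : Int), ['A']), (11, ['B']), (12, ['C']), (13, ['D']), (14, ['E']), (15, ['F'])]

-- A's while loop; Python enters it only after num = abs(num) with num > 0, so a Nat argument is exact there
def convLoopA (n : Nat) (hexNums : List Char) : List Char :=
  if n = 0 then hexNums
  else convLoopA (n / 16)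
    (hexNums ++ (match hexDictA.get? ((n % 16 : Nat) : Int) with
                 | some v => v
                 | none => PySem.Int.toChars ((n % 16 : Nat) : Int)))
decreasing_by exact Nat.div_lt_self (by omega) (by omega)

-- the comprehension [hex_nums[i:i+2][::-1] for i in reversed(range(0, len(hex_nums), 2))]
def groupsA (hexNums : List Char) : List (List Char) :=
  ((PySem.List.pyRange 0 (PySem.List.len hexNums) 2).reverse).map
    (fun i => (PySem.List.slice? (PySem.List.slice hexNums (some i) (some (i + 2))) none none (-1)).getD [])

def conv_endian (num : Int) (endian : String) : Option String :=
  if endian ≠ "big" ∧ endian ≠ "little" then none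
  else if num = 0 then some "00"
  else
    let sign : List Char := if num < 0 then ['-'] else []
    let hexNums := convLoopA num.natAbs []
    match groupsA hexNums with
    | [] => none   -- unreachable: num ≠ 0 gives a nonempty result (Python would raise IndexError on result[0])
    | r0 :: rest =>
      let r0 := if r0.length < 2 then '0' :: r0 else r0
      let joined := if endian = "big" then PySem.Chars.join [' '] (r0 :: rest)
                    else PySem.Chars.join [' '] ((r0 :: rest).reverse)
      some (String.ofList (sign ++ joined))

-- ===== PORT B =====
-- '0123456789abcdef'[d] — bytes.hex() emits lowercase hex digits
def hexLowerB (d : Nat) : Char := if d < 10 then Char.ofNat (48 + d) else Char.ofNat (87 + d)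

-- one byte rendered by bytes.hex(): two lowercase hex digits
def byteHexB (b : Nat) : List Char := [hexLowerB (b / 16), hexLowerB (b % 16)]

-- n.to_bytes(nbytes, 'big'): big-endian base-256 digits, zero-padded on the left to nbytes
def toBytesBE (n : Nat) (nbytes : Nat) : List Nat :=
  match nbytes with
  | 0 => []
  | m + 1 => toBytesBE (n / 256) m ++ [n % 256]

def conv_endian_alt (num : Int) (endian : String) : Option String :=
  if endian = "big" ∨ endian = "little" then
    let sign : List Char := if num < 0 then ['-'] else []
    let n : Nat := num.natAbs
    let nbytes : Nat := max 1 ((PySem.Int.bitLength (n : Int) + 7) / 8)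
    -- n.to_bytes(nbytes, 'little') is the big-endian byte list reversed
    let bs : List Nat := if endian = "big" then toBytesBE n nbytes else (toBytesBE n nbytes).reverse
    -- bytes.hex(' ') then .upper()
    some (String.ofList (sign ++ PySem.Chars.upper (PySem.Chars.join [' '] (bs.map byteHexB))))
  else none

-- ===== PRECONDITION & SPEC =====
def Spec_conv_endian (num : Int) (endian : String) (out : Option String) : Prop := out = conv_endian_alt num endian
instance (num : Int) (endian : String) (out : Option String) : Decidable (Spec_conv_endian num endian out) := by unfold Spec_conv_endian; infer_instance

-- ===== CLAIM (what is proved, stated in full; the proofs are below) =====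
def Claim_equal_conv_endian : Prop := ∀ (num : Int) (endian : String), Dom_conv_endian num endian → Spec_conv_endian num endian (conv_endian num endian)

-- ===== LEMMAS AND PROOFS =====

-- uppercase hex digit character
def uHex (d : Nat) : Char := if d < 10 then Char.ofNat (48 + d) else Char.ofNat (55 + d)

-- A's hex string: least-significant hex digit first
def dLSB (n : Nat) : List Char :=
  if n = 0 then [] else uHex (n % 16) :: dLSB (n / 16)
decreasing_by exact Nat.div_lt_self (by omega) (by omega)

def byteHexU (b : Nat) : List Char := [uHex (b / 16), uHex (b % 16)]

-- A's byte groups read least-significant group first, each group already most-significant-digit first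
def cleanPairs (L : List Char) : List (List Char) :=
  (List.range ((L.length + 1) / 2)).map (fun k => ((L.drop (2 * k)).take 2).reverse)

def padFirst : List (List Char) → List (List Char)
  | [] => []
  | r0 :: rest => (if r0.length < 2 then '0' :: r0 else r0) :: rest

def nbytesOf (n : Nat) : Nat := max 1 ((PySem.Int.bitLength (n : Int) + 7) / 8)

theorem digitA (r : Nat) (h : r < 16) :
    (match hexDictA.get? ((r : Nat) : Int) with
     | some v => v
     | none => PySem.Int.toChars ((r : Nat) : Int)) = [uHex r] := by
  revert h; revert r; decide

theorem convLoopA_eq (n : Nat) (acc : List Char) : convLoopA n acc = acc ++ dLSB n := by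
  induction n using Nat.strong_induction_on generalizing acc with
  | _ n ih =>
    rw [convLoopA, dLSB]
    by_cases h : n = 0
    · simp [h]
    · rw [if_neg h, if_neg h, ih (n / 16) (Nat.div_lt_self (by omega) (by omega)),
        digitA (n % 16) (Nat.mod_lt _ (by omega))]
      simp

theorem rangeStep2 (n : Nat) :
    PySem.List.pyRange 0 (n : Int) 2 =
      (List.range ((n + 1) / 2)).map (fun k => ((2 * k : Nat) : Int)) := by
  rw [PySem.List.pyRange_of_pos 0 n (by norm_num)]
  rcases Nat.eq_zero_or_pos n with h | h
  · subst h; simp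
  · have h1 : (0 : Int) < n := by exact_mod_cast h
    rw [if_pos h1]
    have : ((n : Int) - 0 + 2 - 1) / 2 = ((n + 1 : Nat) / 2 : Nat) := by
      push_cast [Int.natCast_div]
      omega
    rw [this]
    simp only [Int.toNat_natCast]
    apply List.map_congr_left
    intro k _; push_cast; ring

theorem groupsA_eq (L : List Char) : groupsA L = (cleanPairs L).reverse := by
  unfold groupsA
  rw [List.map_reverse]
  congr 1
  rw [PySem.List.len_eq, rangeStep2, List.map_map]
  unfold cleanPairs
  apply List.map_congr_left
  intro k _
  simp only [Function.comp_apply, PySem.List.slice?_none_none_neg_one, Option.getD_some]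
  congr 1
  have h2 : ((2 * k : Nat) : Int) + 2 = ((2 * k + 2 : Nat) : Int) := by push_cast; ring
  rw [h2, PySem.List.slice_natCast]
  congr 1
  omega

theorem cleanPairs_nil : cleanPairs [] = [] := by simp [cleanPairs]

theorem cleanPairs_single (c : Char) : cleanPairs [c] = [[c]] := by
  simp [cleanPairs, List.range_succ]

theorem cleanPairs_cons2 (a b : Char) (t : List Char) :
    cleanPairs (a :: b :: t) = [b, a] :: cleanPairs t := by
  unfold cleanPairs
  have hl : ((a :: b :: t).length + 1) / 2 = (t.length + 1) / 2 + 1 := by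
    simp only [List.length_cons]; omega
  rw [hl, List.range_succ_eq_map]
  simp [List.map_map, Function.comp_def, Nat.mul_succ, Nat.succ_eq_add_one]

theorem padFirst_append (X Y : List (List Char)) (h : X ≠ []) :
    padFirst (X ++ Y) = padFirst X ++ Y := by
  cases X with
  | nil => exact absurd rfl h
  | cons r0 rest => simp [padFirst]

theorem dLSB_ne_nil (n : Nat) (h : n ≠ 0) : dLSB n ≠ [] := by
  rw [dLSB, if_neg h]; simp

theorem cleanPairs_ne_nil (L : List Char) (h : L ≠ []) : cleanPairs L ≠ [] := by
  unfold cleanPairs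
  have h1 : L.length ≠ 0 := by simpa using h
  have h2 : (L.length + 1) / 2 ≠ 0 := by omega
  simp [List.range_eq_nil, h2]

theorem blpow (k : Nat) : ∀ q r : Nat, 1 ≤ q → r < 2 ^ k →
    PySem.Int.bitLength ((2 ^ k * q + r : Nat) : Int) = PySem.Int.bitLength (q : Int) + k := by
  induction k with
  | zero => intro q r hq hr; interval_cases r; simp
  | succ k ih =>
    intro q r hq hr
    have hm : 0 < 2 ^ (k + 1) * q + r := by positivity
    rw [PySem.Int.bitLength_natCast hm]
    have hdiv : (2 ^ (k + 1) * q + r) / 2 = 2 ^ k * q + r / 2 := by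
      have h2 : 2 ^ (k + 1) * q = 2 * (2 ^ k * q) := by ring
      rw [h2]
      omega
    rw [hdiv, ih q (r / 2) hq (by omega)]
    omega

theorem bitLength_pos (n : Nat) (h : 1 ≤ n) : 1 ≤ PySem.Int.bitLength (n : Int) := by
  by_contra hc
  have h0 : PySem.Int.bitLength (n : Int) = 0 := by omega
  have := PySem.Int.lt_two_pow_bitLength (n : Int)
  rw [h0] at this
  simp at this
  omega

theorem bitLength_le_8 (n : Nat) (h : n < 256) : PySem.Int.bitLength (n : Int) ≤ 8 := by
  by_contra hc
  rcases Nat.eq_zero_or_pos n with h0 | h0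
  · subst h0; simp at hc
  · have h2 := PySem.Int.two_pow_bitLength_le (n : Int) (by exact_mod_cast h0.ne')
    have h3 : (2 : Nat) ^ 8 ≤ 2 ^ (PySem.Int.bitLength (n : Int) - 1) :=
      Nat.pow_le_pow_right (by omega) (by omega)
    simp only [Int.natAbs_natCast] at h2
    omega

theorem nbytesOf_small (n : Nat) (h1 : 1 ≤ n) (h2 : n < 256) : nbytesOf n = 1 := by
  unfold nbytesOf
  have := bitLength_pos n h1
  have := bitLength_le_8 n h2
  omega

theorem nbytesOf_big (n : Nat) (h : 256 ≤ n) : nbytesOf n = nbytesOf (n / 256) + 1 := by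
  unfold nbytesOf
  have hq : 1 ≤ n / 256 := by omega
  have hbl : PySem.Int.bitLength ((n : Nat) : Int) = PySem.Int.bitLength ((n / 256 : Nat) : Int) + 8 := by
    have hb := blpow 8 (n / 256) (n % 256) hq (by omega)
    have hn : 2 ^ 8 * (n / 256) + n % 256 = n := by omega
    rw [hn] at hb
    exact hb
  rw [hbl]
  have := bitLength_pos (n / 256) hq
  omega

theorem main_eq (n : Nat) (h : 1 ≤ n) :
    padFirst ((cleanPairs (dLSB n)).reverse) = (toBytesBE n (nbytesOf n)).map byteHexU := by
  induction n using Nat.strong_induction_on with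
  | _ n ih =>
    by_cases h16 : n < 16
    · rw [dLSB, if_neg (by omega), Nat.mod_eq_of_lt h16, Nat.div_eq_of_lt h16, dLSB, if_pos rfl]
      rw [cleanPairs_single, nbytesOf_small n h (by omega)]
      simp only [toBytesBE, List.map_cons, List.map_nil, List.reverse_cons,
        List.reverse_nil, List.nil_append]
      rw [Nat.mod_eq_of_lt (show n < 256 by omega)]
      simp [padFirst, byteHexU, Nat.div_eq_of_lt h16, Nat.mod_eq_of_lt h16]
      decide
    · by_cases h256 : n < 256
      · have hq : n / 16 < 16 := by omega
        rw [dLSB, if_neg (by omega), dLSB, if_neg (by omega),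
          Nat.mod_eq_of_lt hq, Nat.div_eq_of_lt hq, dLSB, if_pos rfl]
        rw [cleanPairs_cons2, cleanPairs_nil, nbytesOf_small n h h256]
        simp only [toBytesBE, List.map_nil, List.nil_append, List.map_cons, List.reverse_cons,
          List.reverse_nil]
        rw [Nat.mod_eq_of_lt h256]
        simp [padFirst, byteHexU]
      · have hq1 : 1 ≤ n / 256 := by omega
        have hkey : dLSB n = uHex (n % 16) :: uHex ((n / 16) % 16) :: dLSB (n / 256) := by
          rw [dLSB, if_neg (by omega), dLSB, if_neg (by omega)]
          rw [Nat.div_div_eq_div_mul]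
        rw [hkey, cleanPairs_cons2, List.reverse_cons]
        have hX : (cleanPairs (dLSB (n / 256))).reverse ≠ [] := by
          simp only [ne_eq, List.reverse_eq_nil_iff]
          exact cleanPairs_ne_nil _ (dLSB_ne_nil _ (by omega))
        rw [padFirst_append _ _ hX, ih (n / 256) (by omega) hq1,
          nbytesOf_big n (by omega)]
        simp only [toBytesBE, List.map_append, List.map_cons, List.map_nil]
        have e1 : n / 16 % 16 = n % 256 / 16 := by omega
        have e2 : n % 16 = n % 256 % 16 := by omega
        rw [byteHexU, ← e1, ← e2]

theorem toBytesBE_lt (n m : Nat) : ∀ b ∈ toBytesBE n m, b < 256 := by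
  induction m generalizing n with
  | zero => simp [toBytesBE]
  | succ m ih =>
    intro b hb
    rw [toBytesBE] at hb
    rcases List.mem_append.1 hb with hx | hx
    · exact ih _ _ hx
    · simp at hx; omega

theorem upper_byteHexB (b : Nat) (h : b < 256) :
    PySem.Chars.upper (byteHexB b) = byteHexU b := by
  have hu : ∀ d : Nat, d < 16 → PySem.Chars.upperChar (hexLowerB d) = uHex d := by decide
  simp only [byteHexB, byteHexU, PySem.Chars.upper, List.map_cons, List.map_nil]
  rw [hu _ (by omega), hu _ (by omega)]

theorem upper_join (bs : List Nat) (h : ∀ b ∈ bs, b < 256) :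
    PySem.Chars.upper (PySem.Chars.join [' '] (bs.map byteHexB)) =
      PySem.Chars.join [' '] (bs.map byteHexU) := by
  induction bs with
  | nil => decide
  | cons b t ih =>
    cases t with
    | nil =>
      simp only [List.map_cons, List.map_nil, PySem.Chars.join_singleton]
      exact upper_byteHexB b (h b (by simp))
    | cons c t2 =>
      simp only [List.map_cons, PySem.Chars.join_cons_cons]
      have hb := upper_byteHexB b (h b (by simp))
      simp only [PySem.Chars.upper, List.map_append] at *
      rw [hb]
      have ht := ih (fun x hx => h x (List.mem_cons_of_mem _ hx))
      simp only [List.map_cons] at ht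
      rw [ht]
      have hsp : List.map PySem.Chars.upperChar [' '] = [' '] := by decide
      rw [hsp]

-- ===== VERDICT (by name: the statement is the Claim_ definition above) =====
theorem conv_endian_spec : Claim_equal_conv_endian := by
  unfold Claim_equal_conv_endian
  intro num endian _
  unfold Spec_conv_endian
  by_cases hv : endian = "big" ∨ endian = "little"
  · by_cases h0 : num = 0
    · subst h0
      rcases hv with h | h <;> subst h <;> decide
    · have hn : 1 ≤ num.natAbs := by
        have := Int.natAbs_pos.mpr h0; omega
      have hA : conv_endian num endian =
          some (String.ofList ((if num < 0 then ['-'] else []) ++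
            (if endian = "big" then
              PySem.Chars.join [' '] (padFirst ((cleanPairs (dLSB num.natAbs)).reverse))
             else
              PySem.Chars.join [' '] ((padFirst ((cleanPairs (dLSB num.natAbs)).reverse)).reverse)))) := by
        rw [conv_endian, if_neg (by tauto), if_neg h0]
        have hg : groupsA (convLoopA num.natAbs []) = (cleanPairs (dLSB num.natAbs)).reverse := by
          rw [convLoopA_eq, List.nil_append, groupsA_eq]
        have hne : (cleanPairs (dLSB num.natAbs)).reverse ≠ [] := by
          simp only [ne_eq, List.reverse_eq_nil_iff]
          exact cleanPairs_ne_nil _ (dLSB_ne_nil _ (by omega))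
        obtain ⟨r0, rest, heq⟩ := List.exists_cons_of_ne_nil hne
        simp only [hg, heq, padFirst]
      have hB : conv_endian_alt num endian =
          some (String.ofList ((if num < 0 then ['-'] else []) ++
            PySem.Chars.join [' ']
              ((if endian = "big" then toBytesBE num.natAbs (nbytesOf num.natAbs)
                else (toBytesBE num.natAbs (nbytesOf num.natAbs)).reverse).map byteHexU))) := by
        rw [conv_endian_alt, if_pos hv]
        simp only []
        rcases em (endian = "big") with hbig | hbig
        · simp only [if_pos hbig]
          rw [upper_join _ (toBytesBE_lt _ _)]
          rfl
        · simp only [if_neg hbig]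
          rw [upper_join _ (fun b hb => toBytesBE_lt _ _ b (List.mem_reverse.mp hb))]
          rfl
      rw [hA, hB]
      congr 2
      rcases em (endian = "big") with hbig | hbig
      · rw [if_pos hbig, if_pos hbig, main_eq _ hn]
      · rw [if_neg hbig, if_neg hbig, main_eq _ hn, List.map_reverse]
  · rw [not_or] at hv
    rw [conv_endian, conv_endian_alt, if_pos hv, if_neg (by tauto)]
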